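-- pv_equiv track=rewrite | github.com/apssouza22/Auto-GPT | autogpt/json_fixes/parsing.py | extract_longest_curly_braces_content
-- ===== SOURCE A (Python) =====
-- def extract_longest_curly_braces_content(string):
--     """
--     :param string: The string to extract the longest content from.
--     Extract the longest content between valid curly braces in a string.
--     This is useful when the return contain multiple JSON objects or texts.
--     """
--     stack = []
--     start = -1
--     result = ''
--     longest_len = 0
--     longest_content = ''
--     for i in range(len(string)):
--         if string[i] == '{':
--             stack.append(i)
--         elif string[i] == '}':
--             if len(stack) == 0:
--                 start = i
--             else:
--                 start = stack.pop()
--                 if len(stack) == 0: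
--                     content = string[start + 1:i]
--                     content_len = len(content)
--                     if content_len > longest_len:
--                         longest_len = content_len
--                         longest_content = content
--     return f"{{{longest_content}}}"
-- ===== SOURCE B (Python) =====
-- def extract_longest_curly_braces_content(string):
--     """Depth counter + running character buffer instead of an index stack and slicing."""
--     depth = 0
--     buf = []
--     best = ''
--     for ch in string:
--         if ch == '{':
--             if depth == 0:
--                 buf = []
--             else:
--                 buf.append(ch)
--             depth += 1
--         elif ch == '}':
--             if depth == 0:
--                 pass
--             elif depth == 1:
--                 depth = 0
--                 content = ''.join(buf)
--                 if len(best) < len(content):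
--                     best = content
--             else:
--                 depth -= 1
--                 buf.append(ch)
--         else:
--             if depth != 0:
--                 buf.append(ch)
--     return '{' + best + '}'
-- ===== Notes on version B (the rewrite author's own statement) =====
-- stated objective: simpler
-- what changed: Replaces the stack of open-brace indices plus string slicing with an integer depth counter and a running character buffer: content is accumulated as characters are scanned instead of being recovered by slicing between stored indices.
import Mathlib
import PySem

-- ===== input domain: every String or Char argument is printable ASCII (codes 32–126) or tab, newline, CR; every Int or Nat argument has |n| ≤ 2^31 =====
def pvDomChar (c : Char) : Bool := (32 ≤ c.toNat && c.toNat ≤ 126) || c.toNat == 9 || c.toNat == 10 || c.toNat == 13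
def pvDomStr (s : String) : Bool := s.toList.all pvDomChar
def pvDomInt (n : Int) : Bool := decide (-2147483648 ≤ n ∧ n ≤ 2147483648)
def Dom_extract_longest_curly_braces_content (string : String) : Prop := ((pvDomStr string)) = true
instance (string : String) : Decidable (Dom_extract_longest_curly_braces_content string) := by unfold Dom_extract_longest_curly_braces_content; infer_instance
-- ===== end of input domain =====

-- B replaces A's stack of '{' indices and string slicing by a depth counter with a running
-- character buffer; objective: simpler (no index bookkeeping, no slicing).

-- ===== PORT A =====
-- state: (stack of '{' indices, start, longest_len, longest_content)
def pvStepA (cs : List Char) (st : List Int × Int × Int × List Char) (ic : Int × Char) :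
    List Int × Int × Int × List Char :=
  if ic.2 = '{' then (st.1 ++ [ic.1], st.2.1, st.2.2.1, st.2.2.2)
  else if ic.2 = '}' then
    if st.1.length = 0 then (st.1, ic.1, st.2.2.1, st.2.2.2)
    else
      match PySem.List.pop? st.1 with
      | some (s0, rest) =>
        if rest.length = 0 then
          let content := PySem.List.slice cs (some (s0 + 1)) (some ic.1)
          if (content.length : Int) > st.2.2.1 then (rest, s0, (content.length : Int), content)
          else (rest, s0, st.2.2.1, st.2.2.2)
        else (rest, s0, st.2.2.1, st.2.2.2)
      | none => st
  else st

def extract_longest_curly_braces_content (string : String) : String :=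
  let cs := string.toList
  let fin := (PySem.List.enumerate cs 0).foldl (pvStepA cs) ([], -1, 0, [])
  String.ofList ('{' :: fin.2.2.2 ++ ['}'])

-- ===== PORT B =====
-- state: (depth, buffer of chars since the outermost '{', best content so far)
def pvStepB (st : Nat × List Char × List Char) (c : Char) : Nat × List Char × List Char :=
  if c = '{' then (st.1 + 1, if st.1 = 0 then [] else st.2.1 ++ [c], st.2.2)
  else if c = '}' then
    if st.1 = 0 then st
    else if st.1 = 1 then (0, st.2.1, if st.2.2.length < st.2.1.length then st.2.1 else st.2.2)
    else (st.1 - 1, st.2.1 ++ [c], st.2.2)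
  else if st.1 = 0 then st else (st.1, st.2.1 ++ [c], st.2.2)

def extract_longest_curly_braces_content_alt (string : String) : String :=
  let fin := string.toList.foldl pvStepB (0, [], [])
  String.ofList ('{' :: fin.2.2 ++ ['}'])

-- ===== PRECONDITION & SPEC =====
def Spec_extract_longest_curly_braces_content (string : String) (out : String) : Prop := out = extract_longest_curly_braces_content_alt string
instance (string : String) (out : String) : Decidable (Spec_extract_longest_curly_braces_content string out) := by unfold Spec_extract_longest_curly_braces_content; infer_instance

-- ===== CLAIM (what is proved, stated in full; the proofs are below) =====
def Claim_equal_extract_longest_curly_braces_content : Prop := ∀ (string : String), Dom_extract_longest_curly_braces_content string → Spec_extract_longest_curly_braces_content string (extract_longest_curly_braces_content string)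

-- ===== LEMMAS AND PROOFS =====

-- the loop invariant tying A's state to B's state after processing the first k characters
def pvInv (cs : List Char) (k : Nat) (sA : List Int × Int × Int × List Char)
    (sB : Nat × List Char × List Char) : Prop :=
  sB.1 = sA.1.length ∧ sB.2.2 = sA.2.2.2 ∧ sA.2.2.1 = (sA.2.2.2.length : Int) ∧
  (∀ j0 t0, sA.1 = j0 :: t0 →
    ∃ jn : Nat, j0 = (jn : Int) ∧ jn < k ∧
      sB.2.1 = (cs.drop (jn + 1)).take (k - (jn + 1)))

set_option maxRecDepth 8192 in
lemma pv_take_extend {cs : List Char} {jn k : Nat} (hk : k < cs.length) (hj : jn < k) :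
    (cs.drop (jn + 1)).take (k - jn) =
      (cs.drop (jn + 1)).take (k - (jn + 1)) ++ [cs[k]] := by
  have h1 : k - jn = (k - (jn + 1)) + 1 := by omega
  rw [h1, List.take_add_one]
  congr 1
  have hlt : k - (jn + 1) < (cs.drop (jn + 1)).length := by
    simp [List.length_drop]; omega
  rw [List.getElem?_eq_getElem hlt]
  simp [List.getElem_drop]
  congr 1
  omega

lemma pvStep_inv (cs : List Char) (k : Nat) (hk : k < cs.length) (sA) (sB)
    (h : pvInv cs k sA sB) :
    pvInv cs (k + 1) (pvStepA cs sA ((k : Int), cs[k])) (pvStepB sB cs[k]) := by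
  obtain ⟨hd, hb, hl, hh⟩ := h
  obtain ⟨stack, start, llen, lcont⟩ := sA
  obtain ⟨depth, buf, best⟩ := sB
  simp only at hd hb hl hh
  by_cases hc1 : cs[k] = '{'
  · -- push
    cases stack with
    | nil =>
      refine ⟨by simp [pvStepA, pvStepB, hc1, hd], by simp [pvStepA, pvStepB, hc1, hb], by simp [pvStepA, hc1, hl], ?_⟩
      intro j0 t0 hst
      simp [pvStepA, hc1] at hst
      refine ⟨k, by simp [hst.1.symm], by omega, ?_⟩
      simp [pvStepB, hc1, hd]
    | cons j0' t0' =>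
      refine ⟨by simp [pvStepA, pvStepB, hc1, hd], by simp [pvStepA, pvStepB, hc1, hd, hb], by simp [pvStepA, hc1, hl], ?_⟩
      intro j0 t0 hst
      simp [pvStepA, hc1] at hst
      obtain ⟨jn, hj, hjk, hbuf⟩ := hh j0' t0' rfl
      refine ⟨jn, by rw [← hst.1]; exact hj, by omega, ?_⟩
      have : depth = 0 ↔ False := by constructor <;> simp_all [hd]
      simp [pvStepB, hc1, hd, hbuf, pv_take_extend hk hjk]
  · by_cases hc2 : cs[k] = '}'
    · cases stack with
      | nil =>
        refine ⟨by simp [pvStepA, pvStepB, hc1, hc2, hd], by simp [pvStepA, pvStepB, hc1, hc2, hd, hb], by simp [pvStepA, hc1, hc2, hl], ?_⟩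
        intro j0 t0 hst
        simp [pvStepA, hc1, hc2] at hst
      | cons j0' t0' =>
        obtain ⟨jn, hj, hjk, hbuf⟩ := hh j0' t0' rfl
        cases t0' with
        | nil =>
          -- stack = [j0']: pop to empty, record
          have hpop : PySem.List.pop? [j0'] = some (j0', ([] : List Int)) :=
            PySem.List.pop?_last [] j0'
          have hsl : PySem.List.slice cs (some (j0' + 1)) (some (k : Int)) =
              (cs.drop (jn + 1)).take (k - (jn + 1)) := by
            rw [hj]
            have : ((jn : Int) + 1) = ((jn + 1 : Nat) : Int) := by push_cast; ring
            rw [this, PySem.List.slice_natCast]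
          have hd1 : depth = 1 := by simpa using hd
          constructor
          · simp only [pvStepA, pvStepB, hc1, hc2, hpop, hd1, List.length_cons,
              List.length_nil]
            split_ifs <;> first | exact False.elim (by assumption) | simp | omega
          constructor
          · simp only [pvStepA, pvStepB, hc1, hc2, hpop, hd1]
            simp [hsl, hbuf, hl]
            split_ifs with h1 h2 h3 <;> simp_all
          constructor
          · simp only [pvStepA, hc1, hc2, hpop]
            simp [hsl, hbuf, hl]
            split_ifs with h1 <;> simp_all
          · intro j0 t0 hst
            simp only [pvStepA, hc1, hc2, hpop] at hst
            simp at hst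
            split_ifs at hst <;> simp_all
        | cons j1 t1 =>
          -- stack length ≥ 2: pop keeps head
          have hdecomp : j0' :: j1 :: t1 = (j0' :: j1 :: t1).dropLast ++ [(j0' :: j1 :: t1).getLast (by simp)] :=
            (List.dropLast_append_getLast (by simp)).symm
          have hpop : PySem.List.pop? (j0' :: j1 :: t1) =
              some ((j0' :: j1 :: t1).getLast (by simp), (j0' :: j1 :: t1).dropLast) := by
            conv_lhs => rw [hdecomp]
            exact PySem.List.pop?_last _ _
          have hlen : (j0' :: j1 :: t1).dropLast.length ≠ 0 := by
            simp [List.length_dropLast]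
          have hd' : depth = t1.length + 2 := by simpa using hd
          have hdge : depth ≠ 0 ∧ depth ≠ 1 := by omega
          constructor
          · simp only [pvStepA, pvStepB, hc1, hc2, hpop]
            simp [hlen, hdge.1, hdge.2, List.length_dropLast]
            omega

          constructor
          · simp only [pvStepA, pvStepB, hc1, hc2, hpop]
            simp [hlen, hdge.1, hdge.2, hb]
          constructor
          · simp only [pvStepA, hc1, hc2, hpop]
            simp [hlen, hl]
          · intro j0 t0 hst
            simp only [pvStepA, hc1, hc2, hpop] at hst
            simp [hlen] at hst
            refine ⟨jn, by rw [← hst.1]; exact hj, by omega, ?_⟩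
            simp [pvStepB, hc1, hc2, hdge.1, hdge.2, hbuf, pv_take_extend hk hjk]
    · -- other char
      cases stack with
      | nil =>
        refine ⟨by simp [pvStepA, pvStepB, hc1, hc2, hd], by simp [pvStepA, pvStepB, hc1, hc2, hd, hb], by simp [pvStepA, hc1, hc2, hl], ?_⟩
        intro j0 t0 hst
        simp [pvStepA, hc1, hc2] at hst
      | cons j0' t0' =>
        obtain ⟨jn, hj, hjk, hbuf⟩ := hh j0' t0' rfl
        have hdne : depth ≠ 0 := by simp [hd]
        refine ⟨by simp [pvStepA, pvStepB, hc1, hc2, hd, hdne], by simp [pvStepA, pvStepB, hc1, hc2, hdne, hb], by simp [pvStepA, hc1, hc2, hl], ?_⟩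
        intro j0 t0 hst
        simp [pvStepA, hc1, hc2] at hst
        refine ⟨jn, by rw [← hst.1]; exact hj, by omega, ?_⟩
        simp [pvStepB, hc1, hc2, hdne, hbuf, pv_take_extend hk hjk]

lemma pv_loop (cs : List Char) : ∀ (t : List Char) (k : Nat), t = cs.drop k →
    ∀ sA sB, pvInv cs k sA sB →
    pvInv cs (k + t.length)
      ((PySem.List.enumerate t (k : Int)).foldl (pvStepA cs) sA)
      (t.foldl pvStepB sB) := by
  intro t
  induction t with
  | nil => intro k _ sA sB h; simpa [PySem.List.enumerate] using h
  | cons c t' ih =>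
    intro k ht sA sB h
    have hk : k < cs.length := by
      by_contra hnk
      rw [List.drop_eq_nil_of_le (by omega)] at ht
      exact List.cons_ne_nil _ _ ht
    have hc : cs[k] = c := by
      have h1 : (List.drop k cs)[0]? = cs[k + 0]? := List.getElem?_drop
      rw [← ht] at h1
      simp at h1
      have h2 := List.getElem?_eq_getElem hk
      rw [h1.symm] at h2
      exact Option.some.inj h2.symm
    have ht' : t' = cs.drop (k + 1) := by
      rw [← List.tail_drop, ← ht]
      rfl
    rw [PySem.List.enumerate_cons]
    simp only [List.foldl_cons]
    have hstep := pvStep_inv cs k hk sA sB h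
    rw [hc] at hstep
    have hrec := ih (k + 1) ht' _ _ hstep
    have harith : k + 1 + t'.length = k + (c :: t').length := by simp; omega
    rw [harith] at hrec
    have hcast : ((k : Int) + 1) = ((k + 1 : Nat) : Int) := by push_cast; ring
    rw [hcast]
    exact hrec

-- ===== VERDICT (by name: the statement is the Claim_ definition above) =====
theorem extract_longest_curly_braces_content_spec : Claim_equal_extract_longest_curly_braces_content := by
  unfold Claim_equal_extract_longest_curly_braces_content
  intro s _
  unfold Spec_extract_longest_curly_braces_content
  unfold extract_longest_curly_braces_content extract_longest_curly_braces_content_alt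
  have h0 : pvInv s.toList 0 ([], -1, 0, []) (0, [], []) := by
    refine ⟨rfl, rfl, rfl, ?_⟩
    intro j0 t0 h
    exact absurd h (by simp)
  have := pv_loop s.toList s.toList 0 (by simp) _ _ h0
  obtain ⟨_, hb, _, _⟩ := this
  rw [show ((0 : Nat) : Int) = (0 : Int) from rfl] at hb
  simp only
  rw [← hb]
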